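-- pv_equiv track=rewrite | github.com/canelhasmateus/leet | signal/arcade-003-smoothsailing/sortByHeight.py | solution
-- ===== SOURCE A (Python) =====
-- def solution( param1 ):
-- 	people = [ ]
-- 	trees = [ ]
--
-- 	for i, value in enumerate( param1 ):
--
-- 		if value == -1:
-- 			trees.append( i )
-- 		else:
-- 			people.append( value )
--
-- 	people = [ i for i in sorted( people ) ]
-- 	for position in trees:
-- 		people.insert( position, -1 )
--
-- 	return people
-- ===== SOURCE B (Python) =====
-- def solution(param1):
--     it = iter(sorted(v for v in param1 if v != -1))
--     return [-1 if v == -1 else next(it) for v in param1]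
-- ===== Notes on version B (the rewrite author's own statement) =====
-- stated objective: simpler
-- what changed: Replaces the collect-tree-indices plus repeated list.insert reconstruction with a single merge pass over the original list that consumes an iterator of the sorted non-tree heights in place.
import Mathlib
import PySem

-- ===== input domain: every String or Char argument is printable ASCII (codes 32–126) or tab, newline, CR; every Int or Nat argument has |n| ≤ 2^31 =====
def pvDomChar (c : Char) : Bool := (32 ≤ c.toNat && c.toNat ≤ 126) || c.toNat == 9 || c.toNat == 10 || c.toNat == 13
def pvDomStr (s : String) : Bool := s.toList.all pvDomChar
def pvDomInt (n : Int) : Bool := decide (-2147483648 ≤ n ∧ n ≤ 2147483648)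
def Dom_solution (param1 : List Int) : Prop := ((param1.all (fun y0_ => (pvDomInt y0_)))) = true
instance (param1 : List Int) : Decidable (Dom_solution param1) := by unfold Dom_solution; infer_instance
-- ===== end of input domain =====

-- B replaces A's sorted-then-repeated-insert reconstruction with one merge pass consuming the sorted heights (simpler: one comprehension instead of index bookkeeping).

-- ===== PORT A =====
def solution (param1 : List Int) : List Int :=
  let pt := (PySem.List.enumerate param1 0).foldl
    (fun (pt : List Int × List Int) iv =>
      if iv.2 = -1 then (pt.1, pt.2 ++ [iv.1]) else (pt.1 ++ [iv.2], pt.2))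
    ([], [])
  let people := (PySem.List.sorted pt.1 (fun x => x) false).map (fun i => i)
  pt.2.foldl (fun acc pos => PySem.List.insert acc pos (-1)) people

-- ===== PORT B =====
-- the list comprehension with the iterator: walk param1, take the next sorted height at each non-tree slot
-- (the `[]` branch is Python's exhausted iterator, unreachable since the iterator holds exactly the non-tree heights)
def fillSorted : List Int → List Int → List Int
  | [], _ => []
  | v :: vs, s =>
    if v = -1 then (-1) :: fillSorted vs s
    else match s with
      | h :: t => h :: fillSorted vs t
      | [] => []

def solution_alt (param1 : List Int) : List Int :=
  fillSorted param1 (PySem.List.sorted (param1.filter (fun v => v != -1)) (fun x => x) false)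

-- ===== PRECONDITION & SPEC =====
def Spec_solution (param1 : List Int) (out : List Int) : Prop := out = solution_alt param1
instance (param1 : List Int) (out : List Int) : Decidable (Spec_solution param1 out) := by unfold Spec_solution; infer_instance

-- ===== CLAIM (what is proved, stated in full; the proofs are below) =====
def Claim_equal_solution : Prop := ∀ (param1 : List Int), Dom_solution param1 → Spec_solution param1 (solution param1)

-- ===== LEMMAS AND PROOFS =====

/-- The absolute tree positions A collects, starting from offset `k`. -/
def treesFrom (k : Nat) : List Int → List Int
  | [] => []
  | v :: vs => if v = -1 then (k : Int) :: treesFrom (k + 1) vs else treesFrom (k + 1) vs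

theorem enum_fold (p : List Int) : ∀ (k : Nat) (ppl tr : List Int),
    (PySem.List.enumerate p (k : Int)).foldl
      (fun (pt : List Int × List Int) iv =>
        if iv.2 = -1 then (pt.1, pt.2 ++ [iv.1]) else (pt.1 ++ [iv.2], pt.2))
      (ppl, tr)
    = (ppl ++ p.filter (fun v => v != -1), tr ++ treesFrom k p) := by
  induction p with
  | nil => intro k ppl tr; simp [PySem.List.enumerate_nil, treesFrom]
  | cons v vs ih =>
    intro k ppl tr
    rw [PySem.List.enumerate_cons]
    by_cases h : v = -1
    · simp only [List.foldl_cons, h]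
      have : ((k : Int) + 1) = ((k + 1 : Nat) : Int) := by push_cast; ring
      rw [this, ih (k + 1)]
      simp [treesFrom]
    · simp only [List.foldl_cons, if_neg h]
      have : ((k : Int) + 1) = ((k + 1 : Nat) : Int) := by push_cast; ring
      rw [this, ih (k + 1)]
      simp [treesFrom, h, bne_iff_ne]

theorem ins_fold (p : List Int) : ∀ (pre s : List Int),
    s.length = (p.filter (fun v => v != -1)).length →
    (treesFrom pre.length p).foldl (fun acc pos => PySem.List.insert acc pos (-1)) (pre ++ s)
      = pre ++ fillSorted p s := by
  induction p with
  | nil =>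
    intro pre s hs
    simp only [List.filter_nil, List.length_nil, List.length_eq_zero_iff] at hs
    subst hs
    simp [treesFrom, fillSorted]
  | cons v vs ih =>
    intro pre s hs
    by_cases h : v = -1
    · simp only [treesFrom, if_pos h, List.foldl_cons]
      have hins : PySem.List.insert (pre ++ s) ((pre.length : Nat) : Int) (-1)
          = (pre ++ [-1]) ++ s := by
        rw [PySem.List.insert_natCast _ _ _ (by simp)]
        simp
      rw [hins]
      have hcnt : s.length = (vs.filter (fun v => v != -1)).length := by
        simpa [List.filter_cons, h] using hs
      have := ih (pre ++ [-1]) s (by simpa using hcnt)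
      simpa [fillSorted, h, List.append_assoc] using this
    · simp only [treesFrom, if_neg h]
      have hcnt : s.length = (vs.filter (fun v => v != -1)).length + 1 := by
        simpa [List.filter_cons, bne_iff_ne, h] using hs
      cases s with
      | nil => simp at hcnt
      | cons x t =>
        have hcnt' : t.length = (vs.filter (fun v => v != -1)).length := by
          simpa using hcnt
        have := ih (pre ++ [x]) t (by simpa using hcnt')
        simpa [fillSorted, h, List.append_assoc] using this

-- ===== VERDICT (by name: the statement is the Claim_ definition above) =====
theorem solution_spec : Claim_equal_solution := by
  intro p _
  unfold Spec_solution solution solution_alt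
  rw [show ((0 : Int)) = ((0 : Nat) : Int) from rfl, enum_fold p 0 [] []]
  simp only [List.nil_append, List.map_id_fun', id]
  have h := ins_fold p [] (PySem.List.sorted (p.filter (fun v => v != -1)) (fun x => x) false)
    (by rw [PySem.List.length_sorted])
  simpa using h
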